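-- pv_equiv track=rewrite | github.com/sajjad7114/secure-password-saving | main.py | remove_padding
-- ===== SOURCE A (Python) =====
-- def remove_padding(padded):
--     raw = ''
--     mode = 'read'
--     for char in padded:
--         if char == 'E' and mode == 'read':
--             mode = 'escape'
--         elif char == 'F' and mode == 'read':
--             break
--         else:
--             raw += char
--             mode = 'read'
--     return raw
-- ===== SOURCE B (Python) =====
-- def remove_padding(padded):
--     out = []
--     i = 0
--     n = len(padded)
--     while i < n:
--         c = padded[i]
--         if c == 'E':
--             if i + 1 < n:
--                 out.append(padded[i + 1])
--             i += 2
--         elif c == 'F':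
--             break
--         else:
--             out.append(c)
--             i += 1
--     return ''.join(out)
-- ===== Notes on version B (the rewrite author's own statement) =====
-- stated objective: alternative
-- what changed: Replaces the read/escape two-state machine with an index-based while loop that handles the escape character by lookahead (consuming two characters at once) and joins a list at the end instead of concatenating strings.
import Mathlib
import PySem

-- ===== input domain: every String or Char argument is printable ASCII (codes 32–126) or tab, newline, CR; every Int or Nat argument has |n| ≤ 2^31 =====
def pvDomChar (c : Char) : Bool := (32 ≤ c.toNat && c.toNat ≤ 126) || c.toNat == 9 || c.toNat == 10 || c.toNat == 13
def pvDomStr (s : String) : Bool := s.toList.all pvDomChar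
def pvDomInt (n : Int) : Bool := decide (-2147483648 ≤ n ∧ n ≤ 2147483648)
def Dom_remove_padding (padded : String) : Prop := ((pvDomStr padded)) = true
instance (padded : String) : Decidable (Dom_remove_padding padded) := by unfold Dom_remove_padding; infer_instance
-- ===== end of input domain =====

-- B replaces A's read/escape state machine by an index/lookahead loop that consumes
-- two characters at a time on 'E' and joins a list at the end (objective: alternative).


-- ===== PORT A =====
-- A's loop: state = accumulated chars (raw) and the mode flag (true = 'escape').
def removePaddingA : List Char → List Char → Bool → List Char
  | [], raw, _ => raw
  | c :: rest, raw, escape =>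
    if c = 'E' ∧ escape = false then removePaddingA rest raw true
    else if c = 'F' ∧ escape = false then raw
    else removePaddingA rest (raw ++ [c]) false

def remove_padding (padded : String) : String :=
  String.ofList (removePaddingA padded.toList [] false)

-- ===== PORT B =====
-- B's while loop: recursion on the remaining characters, consuming two on 'E' (lookahead).
def removePaddingB : List Char → List Char
  | [] => []
  | 'E' :: rest =>
    match rest with
    | [] => []
    | c :: rest' => c :: removePaddingB rest'
  | 'F' :: _ => []
  | c :: rest => c :: removePaddingB rest

def remove_padding_alt (padded : String) : String :=
  String.ofList (removePaddingB padded.toList)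

-- ===== PRECONDITION & SPEC =====
def Spec_remove_padding (padded : String) (out : String) : Prop := out = remove_padding_alt padded
instance (padded : String) (out : String) : Decidable (Spec_remove_padding padded out) := by unfold Spec_remove_padding; infer_instance

-- ===== CLAIM (what is proved, stated in full; the proofs are below) =====
def Claim_equal_remove_padding : Prop := ∀ (padded : String), Dom_remove_padding padded → Spec_remove_padding padded (remove_padding padded)

-- ===== LEMMAS AND PROOFS =====
theorem removePaddingA_eq (cs : List Char) :
    ∀ raw, removePaddingA cs raw false = raw ++ removePaddingB cs := by
  induction cs using removePaddingB.induct with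
  | case1 => intro raw; simp [removePaddingA, removePaddingB]
  | case2 =>
    intro raw
    simp [removePaddingA, removePaddingB]
  | case3 c rest' ih =>
    intro raw
    simp [removePaddingA, removePaddingB, ih]
  | case4 => intro raw; simp [removePaddingA, removePaddingB]
  | case5 c rest h1 h2 ih =>
    intro raw
    simp only [removePaddingA, ih]
    have hB : removePaddingB (c :: rest) = c :: removePaddingB rest := by
      unfold removePaddingB
      split
      all_goals simp_all
      rw [removePaddingB.eq_def]
    rw [if_neg (fun h => h1 h.1), if_neg (fun h => h2 h.1), hB]
    simp

-- ===== VERDICT (by name: the statement is the Claim_ definition above) =====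
theorem remove_padding_spec : Claim_equal_remove_padding := by
  intro padded _
  unfold Spec_remove_padding remove_padding remove_padding_alt
  rw [removePaddingA_eq]
  simp
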